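-- pv_equiv track=rewrite | github.com/Vineyardcode/voynich_slop | scripts/phase58_cross_script.py | make_bigram_cipher
-- ===== SOURCE A (Python) =====
-- def make_bigram_cipher(words, chars):
--     """
--     Bigram substitution: replace character pairs with single novel symbols.
--     This REDUCES alphabet size but CHANGES character-level statistics.
--     Simulates a polygraphic cipher.
--     """
--     nb = [c for c in chars if c != ' ']
--     # Collect all bigrams
--     bigrams = set()
--     for i in range(0, len(nb)-1, 2):
--         bigrams.add((nb[i], nb[i+1]))
--     # Map each bigram to a unique symbol (use uppercase + digits + symbols)
--     bigram_list = sorted(bigrams)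
--     symbols = [chr(i) for i in range(0x0100, 0x0100 + len(bigram_list))]
--     bg_map = dict(zip(bigram_list, symbols))
--
--     new_chars = []
--     i = 0
--     while i < len(chars):
--         if chars[i] == ' ':
--             new_chars.append(' ')
--             i += 1
--         elif i+1 < len(chars) and chars[i+1] != ' ':
--             bg = (chars[i], chars[i+1])
--             new_chars.append(bg_map.get(bg, chars[i]))
--             i += 2
--         else:
--             new_chars.append(chars[i])
--             i += 1
--
--     # Reconstruct words
--     new_words = []
--     current = []
--     for c in new_chars:
--         if c == ' ':
--             if current:
--                 new_words.append(''.join(current))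
--                 current = []
--         else:
--             current.append(c)
--     if current:
--         new_words.append(''.join(current))
--     return new_words, new_chars
-- ===== SOURCE B (Python) =====
-- def make_bigram_cipher(words, chars):
--     nb = [c for c in chars if c != ' ']
--     it = iter(nb)
--     bigram_list = sorted(set(zip(it, it)))
--     symbols = [chr(i) for i in range(0x0100, 0x0100 + len(bigram_list))]
--     bg_map = dict(zip(bigram_list, symbols))
--
--     new_words = []
--     new_chars = []
--     i = 0
--     n = len(chars)
--     while i < n:
--         if chars[i] == ' ':
--             new_chars.append(' ')
--             i += 1
--         else:
--             j = i
--             while j < n and chars[j] != ' ':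
--                 j += 1
--             run = chars[i:j]
--             seg = [bg_map.get((run[k], run[k+1]), run[k]) for k in range(0, len(run) - 1, 2)]
--             if len(run) % 2 == 1:
--                 seg.append(run[-1])
--             new_words.append(''.join(seg))
--             new_chars.extend(seg)
--             i = j
--     return new_words, new_chars
-- ===== Notes on version B (the rewrite author's own statement) =====
-- stated objective: alternative
-- what changed: A's flat index-driven while-loop over chars plus a separate word-reconstruction pass are replaced by a single walk over maximal non-space runs that pairs each run in place and emits the transformed word and its characters together; the bigram set is collected by pairing an iterator instead of indexing an even range.
import Mathlib
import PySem

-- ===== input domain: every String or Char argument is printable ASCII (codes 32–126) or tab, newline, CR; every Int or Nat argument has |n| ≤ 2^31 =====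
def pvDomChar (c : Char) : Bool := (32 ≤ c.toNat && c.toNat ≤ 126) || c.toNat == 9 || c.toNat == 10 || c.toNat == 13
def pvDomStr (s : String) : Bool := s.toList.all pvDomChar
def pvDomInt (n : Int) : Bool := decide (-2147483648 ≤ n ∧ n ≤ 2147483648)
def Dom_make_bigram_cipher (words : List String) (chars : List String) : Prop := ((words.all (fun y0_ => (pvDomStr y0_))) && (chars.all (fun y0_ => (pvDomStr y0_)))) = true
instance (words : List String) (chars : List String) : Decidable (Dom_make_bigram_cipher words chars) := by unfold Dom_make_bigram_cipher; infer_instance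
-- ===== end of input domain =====

-- B replaces A's flat index-driven while-loop plus the separate word-reconstruction pass by a single
-- per-segment walk (maximal non-space runs paired in place), producing both outputs in one pass; objective: alternative.

-- ===== PORT A =====
-- the while-loop over `chars` (position carried as the remaining suffix; i += 1 / i += 2 drop one / two elements)
def make_bigram_cipher_loop (m : PySem.Dict (String × String) String) : List String → List String
  | [] => []
  | c :: rest =>
    if c = " " then " " :: make_bigram_cipher_loop m rest
    else
      match rest with
      | d :: rest' =>
        if d ≠ " " then m.getD (c, d) c :: make_bigram_cipher_loop m rest'
        else c :: make_bigram_cipher_loop m (d :: rest')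
      | [] => [c]

-- the word-reconstruction for-loop, state (new_words, current) passed explicitly; the trailing `if current:` folded into the [] case
def make_bigram_cipher_rebuild : List String → List String → List String → List String
  | [], nw, cur => if cur ≠ [] then nw ++ [PySem.Str.join "" cur] else nw
  | c :: t, nw, cur =>
    if c = " " then
      if cur ≠ [] then make_bigram_cipher_rebuild t (nw ++ [PySem.Str.join "" cur]) []
      else make_bigram_cipher_rebuild t nw cur
    else make_bigram_cipher_rebuild t nw (cur ++ [c])

def make_bigram_cipher (words : List String) (chars : List String) : List String × List String :=
  let nb := chars.filter (fun c => decide (c ≠ " "))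
  let bigrams : PySem.Set (String × String) :=
    (PySem.List.pyRange 0 ((nb.length : Int) - 1) 2).foldl
      (fun s i => PySem.Set.add s (PySem.List.pyGetD nb i "", PySem.List.pyGetD nb (i + 1) "")) PySem.Set.empty
  let bigram_list := PySem.List.sorted2 bigrams (fun p => p.1) (fun p => p.2)
  let symbols := (PySem.List.pyRange 256 (256 + (bigram_list.length : Int)) 1).map (fun i => String.ofList [Char.ofNat i.toNat])
  let bg_map := PySem.Dict.ofList (bigram_list.zip symbols)
  let new_chars := make_bigram_cipher_loop bg_map chars
  let new_words := make_bigram_cipher_rebuild new_chars [] []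
  (new_words, new_chars)

-- ===== PORT B =====
-- zip(it, it): consecutive disjoint pairs
def make_bigram_cipher_alt_pairs : List String → List (String × String)
  | [] => []
  | [_] => []
  | a :: b :: t => (a, b) :: make_bigram_cipher_alt_pairs t

-- the inner while over `run`: map each pair through bg_map (default first member), keep an odd trailing element
def make_bigram_cipher_alt_seg (m : PySem.Dict (String × String) String) : List String → List String
  | [] => []
  | [a] => [a]
  | a :: b :: t => m.getD (a, b) a :: make_bigram_cipher_alt_seg m t

-- the outer while over `rest`: spaces pass through, a maximal non-space run becomes one transformed word
def make_bigram_cipher_alt_walk (m : PySem.Dict (String × String) String) : List String → List String × List String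
  | [] => ([], [])
  | c :: rest =>
    if c = " " then
      let p := make_bigram_cipher_alt_walk m rest
      (p.1, " " :: p.2)
    else
      let seg := make_bigram_cipher_alt_seg m (c :: rest.takeWhile (fun x => decide (x ≠ " ")))
      let p := make_bigram_cipher_alt_walk m (rest.dropWhile (fun x => decide (x ≠ " ")))
      (PySem.Str.join "" seg :: p.1, seg ++ p.2)
termination_by l => l.length
decreasing_by
  · simp
  · have h := List.length_dropWhile_le (fun x => decide (x ≠ " ")) rest
    simp only [List.length_cons]
    omega

def make_bigram_cipher_alt (words : List String) (chars : List String) : List String × List String :=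
  let nb := chars.filter (fun c => decide (c ≠ " "))
  let bigram_list := PySem.List.sorted2 (PySem.Set.ofList (make_bigram_cipher_alt_pairs nb)) (fun p => p.1) (fun p => p.2)
  let symbols := (PySem.List.pyRange 256 (256 + (bigram_list.length : Int)) 1).map (fun i => String.ofList [Char.ofNat i.toNat])
  let bg_map := PySem.Dict.ofList (bigram_list.zip symbols)
  make_bigram_cipher_alt_walk bg_map chars

-- ===== PRECONDITION & SPEC =====
def Spec_make_bigram_cipher (words : List String) (chars : List String) (out : List String × List String) : Prop := out = make_bigram_cipher_alt words chars
instance (words : List String) (chars : List String) (out : List String × List String) : Decidable (Spec_make_bigram_cipher words chars out) := by unfold Spec_make_bigram_cipher; infer_instance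

-- ===== CLAIM (what is proved, stated in full; the proofs are below) =====
def Claim_equal_make_bigram_cipher : Prop := ∀ (words : List String) (chars : List String), Dom_make_bigram_cipher words chars → Spec_make_bigram_cipher words chars (make_bigram_cipher words chars)

-- ===== LEMMAS AND PROOFS =====

-- the pairs A reads out of nb by index are exactly B's consecutive disjoint pairs
theorem pv_pairs_getD (l : List String) : ∀ k, k < l.length / 2 →
    (make_bigram_cipher_alt_pairs l).getD k ("", "") = (l.getD (2 * k) "", l.getD (2 * k + 1) "") := by
  induction l using make_bigram_cipher_alt_pairs.induct with
  | case1 => intro k hk; simp at hk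
  | case2 a => intro k hk; simp at hk
  | case3 a b t ih =>
    intro k hk
    cases k with
    | zero => simp [make_bigram_cipher_alt_pairs]
    | succ k =>
      have hk' : k < t.length / 2 := by simp [List.length_cons] at hk; omega
      have e1 : 2 * (k + 1) = (2 * k) + 1 + 1 := by omega
      have e2 : 2 * (k + 1) + 1 = (2 * k + 1) + 1 + 1 := by omega
      simp only [make_bigram_cipher_alt_pairs, List.getD_cons_succ, e1, e2]
      exact ih k hk'

theorem pv_pairs_length (l : List String) : (make_bigram_cipher_alt_pairs l).length = l.length / 2 := by
  induction l using make_bigram_cipher_alt_pairs.induct with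
  | case1 => simp [make_bigram_cipher_alt_pairs]
  | case2 a => simp [make_bigram_cipher_alt_pairs]
  | case3 a b t ih => simp [make_bigram_cipher_alt_pairs, ih]; omega

theorem pv_extract_eq_pairs (l : List String) :
    (PySem.List.pyRange 0 ((l.length : Int) - 1) 2).map
      (fun i => (PySem.List.pyGetD l i "", PySem.List.pyGetD l (i + 1) "")) =
    make_bigram_cipher_alt_pairs l := by
  rw [PySem.List.pyRange_of_pos 0 ((l.length : Int) - 1) (by norm_num), List.map_map]
  apply List.ext_getElem
  · simp only [List.length_map, List.length_range, pv_pairs_length]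
    split <;> omega
  · intro i h1 h2
    have hi : i < l.length / 2 := by
      rw [pv_pairs_length] at h2; exact h2
    have h2k : 2 * i < l.length := by omega
    have h2k1 : 2 * i + 1 < l.length := by omega
    simp only [List.getElem_map, List.getElem_range, Function.comp_apply]
    rw [← List.getD_eq_getElem (make_bigram_cipher_alt_pairs l) ("", ""), pv_pairs_getD l i hi]
    have e1 : ((0 : Int) + 2 * (i : Int)) = ((2 * i : Nat) : Int) := by push_cast; ring
    have e2 : ((2 * i : Nat) : Int) + 1 = ((2 * i + 1 : Nat) : Int) := by push_cast; ring
    rw [e1, e2, PySem.List.pyGetD_natCast, PySem.List.pyGetD_natCast]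

-- A's bigram set (fold of adds over the index range) is set(pairs)
theorem pv_set_eq (l : List String) :
    (PySem.List.pyRange 0 ((l.length : Int) - 1) 2).foldl
      (fun s i => PySem.Set.add s (PySem.List.pyGetD l i "", PySem.List.pyGetD l (i + 1) "")) PySem.Set.empty =
    PySem.Set.ofList (make_bigram_cipher_alt_pairs l) := by
  rw [← PySem.Set.update_map_eq_foldl_add, pv_extract_eq_pairs, PySem.Set.update_empty]

-- values reachable in dict(ps) come from ps
theorem pv_values_update {κ ν : Type} [BEq κ] [LawfulBEq κ] (ps : List (κ × ν)) :
    ∀ (d : PySem.Dict κ ν) (v : ν), v ∈ (d.update ps).values → v ∈ d.values ∨ v ∈ ps.map Prod.snd := by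
  induction ps with
  | nil => intro d v h; exact Or.inl h
  | cons p ps ih =>
    intro d v h
    have h1 := ih (d.insert p.1 p.2) v h
    rcases h1 with h1 | h1
    · rcases PySem.Dict.mem_values_insert d p.1 p.2 v h1 with h2 | h2
      · exact Or.inr (by simp [h2])
      · exact Or.inl h2
    · exact Or.inr (by simp only [List.map_cons, List.mem_cons]; exact Or.inr h1)

-- any getD from dict(zip(..)) whose values avoid " " and whose default avoids " " avoids " "
theorem pv_getD_ofList_ne (pairs : List ((String × String) × String))
    (hv : ∀ p ∈ pairs, p.2 ≠ " ") (k : String × String) (dft : String) (hd : dft ≠ " ") :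
    (PySem.Dict.ofList pairs).getD k dft ≠ " " := by
  rw [PySem.Dict.getD_eq_get?_getD]
  cases h : (PySem.Dict.ofList pairs).get? k with
  | none => simpa using hd
  | some v =>
    simp only [Option.getD_some]
    have hmem := PySem.Dict.mem_items_of_get?_eq_some _ h
    have hval : v ∈ (PySem.Dict.ofList pairs).values := by
      simp only [PySem.Dict.values]
      exact List.mem_map.2 ⟨(k, v), hmem, rfl⟩
    have := pv_values_update pairs PySem.Dict.empty v hval
    rcases this with h1 | h1
    · simp [PySem.Dict.empty, PySem.Dict.values] at h1
    · obtain ⟨p, hp, rfl⟩ := List.mem_map.1 h1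
      exact hv p hp

-- the shared bg_map never yields " "
theorem pv_map_ne (bl : List (String × String)) (k : String × String) (dft : String) (hd : dft ≠ " ") :
    (PySem.Dict.ofList (bl.zip ((PySem.List.pyRange 256 (256 + (bl.length : Int)) 1).map
      (fun i => String.ofList [Char.ofNat i.toNat])))).getD k dft ≠ " " := by
  apply pv_getD_ofList_ne _ _ k dft hd
  intro p hp
  have hz := List.of_mem_zip (show (p.1, p.2) ∈ _ from hp)
  obtain ⟨i, hi, hpe⟩ := List.mem_map.1 hz.2
  have h256 : 256 ≤ i := (PySem.List.mem_pyRange_one.1 hi).1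
  intro hcontra
  rw [← hpe] at hcontra
  have hl := congrArg String.toList hcontra
  rw [String.toList_ofList] at hl
  have hsp : (" " : String).toList = [' '] := by decide
  rw [hsp] at hl
  have hc : Char.ofNat i.toNat = ' ' := by simpa using hl
  have ht := congrArg Char.toNat hc
  rw [Char.toNat_ofNat] at ht
  have hsp32 : (' ').toNat = 32 := by decide
  rw [hsp32] at ht
  split at ht <;> omega

-- seg preserves "no element is a space"
theorem pv_seg_ne (m : PySem.Dict (String × String) String)
    (hm : ∀ k dft, dft ≠ " " → m.getD k dft ≠ " ") :
    ∀ l, (∀ x ∈ l, x ≠ " ") → ∀ y ∈ make_bigram_cipher_alt_seg m l, y ≠ " " := by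
  intro l
  induction l using make_bigram_cipher_alt_seg.induct with
  | case1 => intro _ y hy; simp [make_bigram_cipher_alt_seg] at hy
  | case2 a => intro hl y hy; simp [make_bigram_cipher_alt_seg] at hy; subst hy; exact hl _ (by simp)
  | case3 a b t ih =>
    intro hl y hy
    simp only [make_bigram_cipher_alt_seg, List.mem_cons] at hy
    rcases hy with rfl | hy
    · exact hm (a, b) a (hl a (by simp))
    · exact ih (fun x hx => hl x (by simp [hx])) y hy

-- a transformed run is never empty
theorem pv_seg_ne_nil (m : PySem.Dict (String × String) String) (c : String) (X : List String) :
    make_bigram_cipher_alt_seg m (c :: X) ≠ [] := by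
  cases X <;> simp [make_bigram_cipher_alt_seg]

-- A's while-loop splits at the first space: it transforms the leading run like seg
theorem pv_loop_split (m : PySem.Dict (String × String) String) : ∀ cs : List String,
    make_bigram_cipher_loop m cs =
      make_bigram_cipher_alt_seg m (cs.takeWhile (fun x => decide (x ≠ " "))) ++
        make_bigram_cipher_loop m (cs.dropWhile (fun x => decide (x ≠ " "))) := by
  have H : ∀ (n : Nat) (cs : List String), cs.length ≤ n →
      make_bigram_cipher_loop m cs =
        make_bigram_cipher_alt_seg m (cs.takeWhile (fun x => decide (x ≠ " "))) ++
          make_bigram_cipher_loop m (cs.dropWhile (fun x => decide (x ≠ " "))) := by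
    intro n
    induction n with
    | zero =>
      intro cs h
      have : cs = [] := by cases cs with | nil => rfl | cons a t => simp at h
      subst this
      simp [make_bigram_cipher_loop, make_bigram_cipher_alt_seg]
    | succ n ih =>
      intro cs h
      cases cs with
      | nil => simp [make_bigram_cipher_loop, make_bigram_cipher_alt_seg]
      | cons c rest =>
        by_cases hc : c = " "
        · rw [List.takeWhile_cons_of_neg (by simp [hc]), List.dropWhile_cons_of_neg (by simp [hc])]
          simp [make_bigram_cipher_alt_seg]
        · rw [List.takeWhile_cons_of_pos (by simp [hc]), List.dropWhile_cons_of_pos (by simp [hc])]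
          cases rest with
          | nil =>
            simp [make_bigram_cipher_loop, make_bigram_cipher_alt_seg, hc]
          | cons d rest' =>
            by_cases hd : d = " "
            · rw [List.takeWhile_cons_of_neg (by simp [hd]), List.dropWhile_cons_of_neg (by simp [hd])]
              simp [make_bigram_cipher_loop, make_bigram_cipher_alt_seg, hc, hd]
            · rw [List.takeWhile_cons_of_pos (by simp [hd]), List.dropWhile_cons_of_pos (by simp [hd])]
              have hrec := ih rest' (by simp at h; omega)
              simp only [make_bigram_cipher_loop, make_bigram_cipher_alt_seg, hc, hd,
                if_neg (by exact hc), List.cons_append]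
              rw [hrec]
              simp [hd]
  intro cs; exact H cs.length cs le_rfl

-- one-step unfoldings used repeatedly
theorem pv_loop_space (m : PySem.Dict (String × String) String) (rest : List String) :
    make_bigram_cipher_loop m (" " :: rest) = " " :: make_bigram_cipher_loop m rest := by
  rw [make_bigram_cipher_loop.eq_def]
  simp

theorem pv_walk_space (m : PySem.Dict (String × String) String) (rest : List String) :
    make_bigram_cipher_alt_walk m (" " :: rest) =
      ((make_bigram_cipher_alt_walk m rest).1, " " :: (make_bigram_cipher_alt_walk m rest).2) := by
  simp [make_bigram_cipher_alt_walk]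

theorem pv_rebuild_space (t nw cur : List String) (h : cur ≠ []) :
    make_bigram_cipher_rebuild (" " :: t) nw cur =
      make_bigram_cipher_rebuild t (nw ++ [PySem.Str.join "" cur]) [] := by
  simp [make_bigram_cipher_rebuild, h]

theorem pv_rebuild_space_nil (t nw : List String) :
    make_bigram_cipher_rebuild (" " :: t) nw [] = make_bigram_cipher_rebuild t nw [] := by
  simp [make_bigram_cipher_rebuild]

-- B's second component is A's new_chars
theorem pv_chars_eq (m : PySem.Dict (String × String) String) : ∀ cs : List String,
    (make_bigram_cipher_alt_walk m cs).2 = make_bigram_cipher_loop m cs := by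
  have H : ∀ (n : Nat) (cs : List String), cs.length ≤ n →
      (make_bigram_cipher_alt_walk m cs).2 = make_bigram_cipher_loop m cs := by
    intro n
    induction n with
    | zero =>
      intro cs h
      have : cs = [] := by cases cs with | nil => rfl | cons a t => simp at h
      subst this
      simp [make_bigram_cipher_alt_walk, make_bigram_cipher_loop]
    | succ n ih =>
      intro cs h
      cases cs with
      | nil => simp [make_bigram_cipher_alt_walk, make_bigram_cipher_loop]
      | cons c rest =>
        by_cases hc : c = " "
        · subst hc
          have hih := ih rest (by simp at h; omega)
          rw [pv_loop_space, pv_walk_space]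
          simp [hih]
        · have hdrop : (rest.dropWhile (fun x => decide (x ≠ " "))).length ≤ n := by
            have := List.length_dropWhile_le (fun x => decide (x ≠ " ")) rest
            simp at h; omega
          have hih := ih _ hdrop
          rw [pv_loop_split m (c :: rest),
            List.takeWhile_cons_of_pos (by simp [hc]), List.dropWhile_cons_of_pos (by simp [hc])]
          simp only [make_bigram_cipher_alt_walk, if_neg hc]
          simpa using hih
  intro cs; exact H cs.length cs le_rfl

-- rebuild walks over a space-free block by accumulating it
theorem pv_rebuild_block : ∀ (seg : List String), (∀ y ∈ seg, y ≠ " ") →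
    ∀ (X nw cur : List String),
      make_bigram_cipher_rebuild (seg ++ X) nw cur = make_bigram_cipher_rebuild X nw (cur ++ seg) := by
  intro seg
  induction seg with
  | nil => intro _ X nw cur; simp
  | cons s seg' ih =>
    intro hne X nw cur
    have hs : s ≠ " " := hne s (by simp)
    simp only [List.cons_append, make_bigram_cipher_rebuild, if_neg hs]
    rw [ih (fun y hy => hne y (by simp [hy])) X nw (cur ++ [s])]
    simp

-- the head of the dropped suffix is a space
theorem pv_dropWhile_head (l : List String) (x : String) (xs : List String)
    (h : l.dropWhile (fun y => decide (y ≠ " ")) = x :: xs) : x = " " := by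
  induction l with
  | nil => simp at h
  | cons a t ih =>
    by_cases ha : a = " "
    · rw [List.dropWhile_cons_of_neg (by simp [ha])] at h
      have h1 : a = x := by
        have := (List.cons.injEq a t x xs).mp (by exact h)
        exact this.1
      rw [← h1]; exact ha
    · rw [List.dropWhile_cons_of_pos (by simp [ha])] at h
      exact ih h

-- B's first component is A's reconstruction of A's new_chars
theorem pv_words_eq (m : PySem.Dict (String × String) String)
    (hm : ∀ k dft, dft ≠ " " → m.getD k dft ≠ " ") :
    ∀ (n : Nat) (cs : List String), cs.length ≤ n → ∀ nw : List String,
      make_bigram_cipher_rebuild (make_bigram_cipher_loop m cs) nw [] =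
        nw ++ (make_bigram_cipher_alt_walk m cs).1 := by
  intro n
  induction n with
  | zero =>
    intro cs h nw
    have : cs = [] := by cases cs with | nil => rfl | cons a t => simp at h
    subst this
    simp [make_bigram_cipher_loop, make_bigram_cipher_alt_walk, make_bigram_cipher_rebuild]
  | succ n ih =>
    intro cs h nw
    cases cs with
    | nil => simp [make_bigram_cipher_loop, make_bigram_cipher_alt_walk, make_bigram_cipher_rebuild]
    | cons c rest =>
      by_cases hc : c = " "
      · subst hc
        have hih := ih rest (by simp at h; omega) nw
        rw [pv_loop_space, pv_rebuild_space_nil, hih, pv_walk_space]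
      · have htake : ∀ x ∈ c :: rest.takeWhile (fun y => decide (y ≠ " ")), x ≠ " " := by
          intro x hx
          rcases List.mem_cons.1 hx with rfl | hx
          · exact hc
          · simpa using List.mem_takeWhile_imp hx
        have hne : ∀ y ∈ make_bigram_cipher_alt_seg m (c :: rest.takeWhile (fun y => decide (y ≠ " "))),
            y ≠ " " := pv_seg_ne m hm _ htake
        have hnn := pv_seg_ne_nil m c (rest.takeWhile (fun y => decide (y ≠ " ")))
        have hsplit : make_bigram_cipher_loop m (c :: rest) =
            make_bigram_cipher_alt_seg m (c :: rest.takeWhile (fun y => decide (y ≠ " "))) ++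
              make_bigram_cipher_loop m (rest.dropWhile (fun y => decide (y ≠ " "))) := by
          rw [pv_loop_split m (c :: rest),
            List.takeWhile_cons_of_pos (by simp [hc]), List.dropWhile_cons_of_pos (by simp [hc])]
        rw [hsplit, pv_rebuild_block _ hne _ nw []]
        simp only [List.nil_append]
        simp only [make_bigram_cipher_alt_walk, if_neg hc]
        cases hrest' : rest.dropWhile (fun y => decide (y ≠ " ")) with
        | nil =>
          simp [make_bigram_cipher_loop, make_bigram_cipher_rebuild,
            make_bigram_cipher_alt_walk]
          simpa using hnn
        | cons x xs =>
          have hx : x = " " := pv_dropWhile_head rest x xs hrest'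
          subst hx
          have hxs : xs.length ≤ n := by
            have h1 := List.length_dropWhile_le (fun y => decide (y ≠ " ")) rest
            rw [hrest'] at h1
            simp at h1 h
            omega
          have hih := ih xs hxs
            (nw ++ [PySem.Str.join "" (make_bigram_cipher_alt_seg m
              (c :: rest.takeWhile (fun y => decide (y ≠ " "))))])
          rw [pv_loop_space, pv_rebuild_space _ _ _ hnn, hih, pv_walk_space]
          simp

-- ===== VERDICT (by name: the statement is the Claim_ definition above) =====
theorem make_bigram_cipher_spec : Claim_equal_make_bigram_cipher := by
  intro words chars _
  unfold Spec_make_bigram_cipher make_bigram_cipher make_bigram_cipher_alt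
  simp only [pv_set_eq]
  exact Prod.ext
    (pv_words_eq _ (fun k dft hd => pv_map_ne _ k dft hd) chars.length chars le_rfl [])
    ((pv_chars_eq _ chars).symm)
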